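-- pv_equiv track=rewrite | github.com/pmj0324/GENESIS | scripts/audit/generate_architecture_map.py | _internal_target
-- ===== SOURCE A (Python) =====
-- def _internal_target(name: str, modules: set[str]) -> str | None:
--     if not name:
--         return None
--     parts = name.split(".")
--     for i in range(len(parts), 0, -1):
--         cand = ".".join(parts[:i])
--         if cand in modules or any(m.startswith(cand + ".") for m in modules):
--             return cand
--     return None
-- ===== SOURCE B (Python) =====
-- def _internal_target(name: str, modules: set[str]) -> str | None:
--     if not name:
--         return None
--     prefixes = set()
--     for m in modules:
--         mparts = m.split(".")
--         for i in range(1, len(mparts) + 1):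
--             prefixes.add(".".join(mparts[:i]))
--     parts = name.split(".")
--     cands = [parts[0]]
--     for p in parts[1:]:
--         cands.append(cands[-1] + "." + p)
--     for cand in reversed(cands):
--         if cand in prefixes:
--             return cand
--     return None
-- ===== Notes on version B (the rewrite author's own statement) =====
-- stated objective: faster
-- what changed: B precomputes one hash set of every dotted prefix of every module and builds the name's candidate prefixes incrementally, so the per-candidate any()-scan over all modules and the repeated joins disappear.
import Mathlib
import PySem

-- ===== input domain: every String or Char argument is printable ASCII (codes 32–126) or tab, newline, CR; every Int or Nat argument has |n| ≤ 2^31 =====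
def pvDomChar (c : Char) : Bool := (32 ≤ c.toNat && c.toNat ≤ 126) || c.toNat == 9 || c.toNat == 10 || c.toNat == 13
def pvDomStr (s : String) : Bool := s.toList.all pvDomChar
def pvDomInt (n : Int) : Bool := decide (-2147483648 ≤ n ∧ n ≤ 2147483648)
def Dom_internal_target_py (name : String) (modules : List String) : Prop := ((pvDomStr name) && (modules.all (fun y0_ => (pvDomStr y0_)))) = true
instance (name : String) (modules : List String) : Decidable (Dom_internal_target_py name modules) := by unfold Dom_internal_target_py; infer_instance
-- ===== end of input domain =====

-- B replaces A's per-candidate scan over all modules by one precomputed set of every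
-- dotted prefix of every module, looked up once per candidate (alternative algorithm;
-- equivalence proved below). Both ports work on code-point lists via PySem.Chars.

-- ===== PORT A =====
-- 'for i in range(len(parts), 0, -1): … return cand' as first-hit recursion over the range list
def aLoop (parts ms : List (List Char)) : List Int → Option (List Char)
  | [] => none
  | i :: rest =>
    let cand := PySem.Chars.join ['.'] (PySem.List.slice parts none (some i))
    if ms.contains cand || ms.any (fun m => PySem.Chars.startswith m (cand ++ ['.'])) then some cand
    else aLoop parts ms rest

def internal_target_py (name : String) (modules : List String) : Option String :=
  if name.toList = [] then none
  else
    let parts := PySem.Chars.splitOn name.toList ['.']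
    Option.map String.ofList
      (aLoop parts (modules.map String.toList) (PySem.List.pyRange parts.length 0 (-1)))

-- ===== PORT B =====
-- inner loop of Source B: add every '.'-joined prefix of module m to the set

def bAdd (s : PySem.Set (List Char)) (m : List Char) : PySem.Set (List Char) :=
  let mparts := PySem.Chars.splitOn m ['.']
  (PySem.List.pyRange 1 (mparts.length + 1) 1).foldl
    (fun s i => PySem.Set.add s (PySem.Chars.join ['.'] (PySem.List.slice mparts none (some i)))) s

def bPrefixes (ms : List (List Char)) : PySem.Set (List Char) :=
  ms.foldl bAdd PySem.Set.empty


-- cands = [parts[0]]; for p in parts[1:]: cands.append(cands[-1] + "." + p)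
def bCands (acc : List Char) : List (List Char) → List (List Char)
  | [] => [acc]
  | p :: ps => acc :: bCands (acc ++ '.' :: p) ps

-- 'for cand in reversed(cands): if cand in prefixes: return cand'
def bFind (prefs : PySem.Set (List Char)) : List (List Char) → Option (List Char)
  | [] => none
  | c :: cs => if PySem.Set.contains prefs c then some c else bFind prefs cs

def internal_target_py_alt (name : String) (modules : List String) : Option String :=
  if name.toList = [] then none
  else
    let prefs := bPrefixes (modules.map String.toList)
    let parts := PySem.Chars.splitOn name.toList ['.']
    let cands := match parts with
      | [] => []          -- unreachable (split never returns []); totality guard only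
      | p :: ps => bCands p ps
    Option.map String.ofList (bFind prefs cands.reverse)

-- ===== PRECONDITION & SPEC =====
def Spec_internal_target_py (name : String) (modules : List String) (out : Option String) : Prop := out = internal_target_py_alt name modules
instance (name : String) (modules : List String) (out : Option String) : Decidable (Spec_internal_target_py name modules out) := by unfold Spec_internal_target_py; infer_instance

-- ===== CLAIM (what is proved, stated in full; the proofs are below) =====
def Claim_equal_internal_target_py : Prop := ∀ (name : String) (modules : List String), Dom_internal_target_py name modules → Spec_internal_target_py name modules (internal_target_py name modules)

-- ===== LEMMAS AND PROOFS =====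

-- simple structural split on '.', proved equal to PySem.Chars.splitOn below
def sp : List Char → List (List Char)
  | [] => [[]]
  | c :: rest =>
    if c = '.' then [] :: sp rest
    else match sp rest with
      | r :: rs => (c :: r) :: rs
      | [] => [[c]]

theorem sp_ne_nil (l : List Char) : sp l ≠ [] := by
  cases l with
  | nil => simp [sp]
  | cons c rest =>
    simp only [sp]
    split_ifs
    · simp
    · cases h : sp rest <;> simp

theorem splitOn_go_eq (fuel : Nat) :
    ∀ (l cur : List Char) (acc : List (List Char)), l.length < fuel →
      PySem.Chars.splitOn.go ['.'] fuel l cur acc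
        = acc.reverse ++ (sp l).modifyHead (cur.reverse ++ ·) := by
  induction fuel with
  | zero => intro l cur acc h; omega
  | succ n ih =>
    intro l cur acc h
    cases l with
    | nil => simp [PySem.Chars.splitOn.go, sp]
    | cons c rest =>
      rw [PySem.Chars.splitOn.go]
      simp only [List.length_cons] at h
      by_cases hc : c = '.'
      · subst hc
        rw [if_pos (by simp [List.isPrefixOf])]
        rw [ih _ _ _ (by simpa using h)]
        simp only [sp]
        cases hr : sp rest <;> simp [hr]
      · rw [if_neg (by simp [List.isPrefixOf]; exact fun h' => hc h'.symm)]
        rw [ih _ _ _ (by simpa using h)]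
        simp only [sp, if_neg hc]
        cases hr : sp rest with
        | nil => exact absurd hr (sp_ne_nil rest)
        | cons r rs => simp

theorem splitOn_eq_sp (l : List Char) : PySem.Chars.splitOn l ['.'] = sp l := by
  have h := splitOn_go_eq (l.length + 1) l [] [] (by omega)
  simp only [PySem.Chars.splitOn] at *
  rw [h]
  cases h' : sp l with
  | nil => exact absurd h' (sp_ne_nil l)
  | cons a b => simp

def ic : List (List Char) → List Char
  | [] => []
  | [p] => p
  | p :: q :: rs => p ++ '.' :: ic (q :: rs)

theorem intercalate_eq_ic : ∀ ps, List.intercalate ['.'] ps = ic ps := by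
  intro ps
  induction ps with
  | nil => simp [ic, List.intercalate]
  | cons p rest ih =>
    cases rest with
    | nil => simp [ic, List.intercalate, List.intersperse]
    | cons q rs =>
      simp only [ic]
      rw [← ih]
      simp [List.intercalate, List.intersperse]

theorem ic_cons (p : List Char) (rest : List (List Char)) (h : rest ≠ []) :
    ic (p :: rest) = p ++ '.' :: ic rest := by
  cases rest with
  | nil => exact absurd rfl h
  | cons q rs => rfl

theorem ic_sp (l : List Char) : ic (sp l) = l := by
  induction l with
  | nil => simp [sp, ic]
  | cons c rest ih =>
    by_cases hc : c = '.'
    · subst hc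
      rw [show sp ('.' :: rest) = [] :: sp rest from by simp [sp]]
      rw [ic_cons _ _ (sp_ne_nil rest), ih]
      simp
    · simp only [sp, if_neg hc]
      cases hr : sp rest with
      | nil => exact absurd hr (sp_ne_nil rest)
      | cons r rs =>
        rw [hr] at ih
        cases rs with
        | nil => simp [ic] at ih ⊢; simp [ih]
        | cons s ss =>
          rw [ic_cons (c :: r) _ (by simp), ← ih, ic_cons r _ (by simp)]
          simp

theorem sp_no_dot (l : List Char) : ∀ p ∈ sp l, '.' ∉ p := by
  induction l with
  | nil => simp [sp]
  | cons c rest ih =>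
    intro p hp
    by_cases hc : c = '.'
    · subst hc
      rw [show sp ('.' :: rest) = [] :: sp rest from by simp [sp]] at hp
      rcases List.mem_cons.mp hp with rfl | hp
      · simp
      · exact ih p hp
    · cases hr : sp rest with
      | nil => exact absurd hr (sp_ne_nil rest)
      | cons r rs =>
        rw [show sp (c :: rest) = (c :: r) :: rs from by simp [sp, hc, hr]] at hp
        rcases List.mem_cons.mp hp with rfl | hp
        · intro hd
          rcases List.mem_cons.mp hd with h | h
          · exact hc h.symm
          · exact ih r (by rw [hr]; exact List.mem_cons_self) h
        · exact ih p (by rw [hr]; exact List.mem_cons_of_mem _ hp)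

theorem take_prefix (ps : List (List Char)) (k : Nat) (hk1 : 1 ≤ k) (hk2 : k < ps.length) :
    ic (ps.take k) ++ ['.'] <+: ic ps := by
  induction ps generalizing k with
  | nil => simp at hk2
  | cons p rest ih =>
    have hrest : rest ≠ [] := by
      intro h; subst h; simp at hk2; omega
    rw [ic_cons _ _ hrest]
    rcases Nat.eq_or_lt_of_le hk1 with h1 | h1
    · subst h1
      simp [ic]
    · have hk1' : 1 ≤ k - 1 := by omega
      have hk2' : k - 1 < rest.length := by simp at hk2; omega
      have htk : (p :: rest).take k = p :: rest.take (k-1) := by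
        cases k with
        | zero => omega
        | succ n => rw [List.take_succ_cons]; simp
      have hne : rest.take (k-1) ≠ [] := by
        intro h
        have := congrArg List.length h
        rw [List.length_take, List.length_nil] at this
        omega
      rw [htk, ic_cons _ _ hne]
      have := ih (k-1) hk1' hk2'
      simp only [List.append_assoc, List.cons_append]
      rw [List.prefix_append_right_inj]
      simpa using this

theorem prefix_is_take (ps : List (List Char)) (hd : ∀ p ∈ ps, '.' ∉ p) (cand : List Char)
    (h : cand ++ ['.'] <+: ic ps) :
    ∃ k, 1 ≤ k ∧ k ≤ ps.length ∧ cand = ic (ps.take k) := by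
  induction ps generalizing cand with
  | nil =>
    exfalso
    have := h.length_le
    simp [ic] at this
  | cons p rest ih =>
    cases rest with
    | nil =>
      exfalso
      have hdot : '.' ∈ p := by
        have hm : '.' ∈ cand ++ ['.'] := by simp
        have : ic [p] = p := rfl
        rw [this] at h
        exact h.sublist.subset hm
      exact hd p (by simp) hdot
    | cons q rs =>
      rw [ic_cons p (q :: rs) (by simp)] at h
      rcases lt_trichotomy cand.length p.length with hlt | heq | hgt
      · exfalso
        have h1 : cand ++ ['.'] <+: p :=
          List.prefix_of_prefix_length_le h (List.prefix_append _ _) (by simp; omega)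
        exact hd p (by simp) (h1.sublist.subset (by simp))
      · have hceq : cand = p := by
          have h1 : cand <+: p :=
            List.prefix_of_prefix_length_le ((List.prefix_append cand ['.']).trans h)
              (List.prefix_append _ _) (by omega)
          exact List.IsPrefix.eq_of_length h1 heq
        exact ⟨1, le_refl 1, by simp, by simpa [ic] using hceq⟩
      · have hp : p <+: cand :=
          List.prefix_of_prefix_length_le (List.prefix_append _ _)
            ((List.prefix_append cand ['.']).trans h) (by omega)
        obtain ⟨c2, rfl⟩ := hp
        rw [List.append_assoc, show ('.' :: ic (q :: rs)) = ['.'] ++ ic (q :: rs) from rfl,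
          List.prefix_append_right_inj] at h
        cases c2 with
        | nil => simp at hgt
        | cons d c3 =>
          rw [show (d :: c3) ++ ['.'] = d :: (c3 ++ ['.']) from rfl,
            show ['.'] ++ ic (q :: rs) = '.' :: ic (q :: rs) from rfl,
            List.cons_prefix_cons] at h
          obtain ⟨rfl, h'⟩ := h
          obtain ⟨k, hk1, hk2, hk3⟩ := ih (fun x hx => hd x (List.mem_cons_of_mem _ hx)) c3 h'
          refine ⟨k + 1, by omega, by simp at hk2 ⊢; omega, ?_⟩
          rw [List.take_succ_cons, ic_cons _ _ ?_, ← hk3]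
          · cases k with
            | zero => omega
            | succ n => rw [List.take_succ_cons]; simp

theorem cond_per_module (m cand : List Char) :
    (∃ k, 1 ≤ k ∧ k ≤ (sp m).length ∧ cand = ic ((sp m).take k))
      ↔ (cand = m ∨ cand ++ ['.'] <+: m) := by
  constructor
  · rintro ⟨k, hk1, hk2, rfl⟩
    rcases eq_or_lt_of_le hk2 with he | hlt
    · left; rw [he, List.take_length, ic_sp]
    · right
      conv_rhs => rw [← ic_sp m]
      exact take_prefix (sp m) k hk1 hlt
  · rintro (rfl | h)
    · refine ⟨(sp cand).length, ?_, le_refl _, by rw [List.take_length, ic_sp]⟩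
      have := sp_ne_nil cand
      cases hsp : sp cand with
      | nil => exact absurd hsp this
      | cons a b => simp
    · rw [← ic_sp m] at h
      exact prefix_is_take _ (sp_no_dot m) cand h

theorem mem_foldl_add {α β : Type} [BEq α] [LawfulBEq α] (g : β → α) (l : List β)
    (s : PySem.Set α) (x : α) :
    x ∈ l.foldl (fun s a => PySem.Set.add s (g a)) s ↔ x ∈ s ∨ ∃ a ∈ l, x = g a := by
  induction l generalizing s with
  | nil => simp
  | cons a t ih => simp [List.foldl_cons, ih, PySem.Set.mem_add]; tauto

theorem exists_range_iff (mp : List (List Char)) (cand : List Char) :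
    (∃ i ∈ PySem.List.pyRange 1 ((mp.length : Int) + 1) 1,
        cand = PySem.Chars.join ['.'] (PySem.List.slice mp none (some i)))
      ↔ ∃ k, 1 ≤ k ∧ k ≤ mp.length ∧ cand = ic (mp.take k) := by
  constructor
  · rintro ⟨i, hi, rfl⟩
    rw [PySem.List.mem_pyRange_one] at hi
    refine ⟨i.toNat, by omega, by omega, ?_⟩
    rw [PySem.List.slice_to _ (by omega), PySem.Chars.join, intercalate_eq_ic]
  · rintro ⟨k, hk1, hk2, rfl⟩
    refine ⟨(k : Int), by rw [PySem.List.mem_pyRange_one]; omega, ?_⟩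
    rw [PySem.List.slice_to _ (by omega), PySem.Chars.join, intercalate_eq_ic, Int.toNat_natCast]

theorem mem_bAdd (s : PySem.Set (List Char)) (m cand : List Char) :
    cand ∈ bAdd s m ↔ cand ∈ s ∨ cand = m ∨ cand ++ ['.'] <+: m := by
  unfold bAdd
  rw [mem_foldl_add (fun i => PySem.Chars.join ['.'] (PySem.List.slice (PySem.Chars.splitOn m ['.']) none (some i)))]
  rw [splitOn_eq_sp]
  rw [(exists_range_iff (sp m) cand).trans (cond_per_module m cand)]

theorem mem_bPrefixes_mem (ms : List (List Char)) (cand : List Char) :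
    cand ∈ bPrefixes ms ↔ ∃ m ∈ ms, cand = m ∨ cand ++ ['.'] <+: m := by
  unfold bPrefixes
  have aux : ∀ s, cand ∈ ms.foldl bAdd s ↔ cand ∈ s ∨ ∃ m ∈ ms, cand = m ∨ cand ++ ['.'] <+: m := by
    induction ms with
    | nil => simp
    | cons m t ih =>
      intro s
      rw [List.foldl_cons, ih, mem_bAdd]
      simp only [List.mem_cons]
      constructor
      · rintro ((hs | hm) | ⟨x, hx, hxx⟩)
        · exact Or.inl hs
        · exact Or.inr ⟨m, Or.inl rfl, hm⟩
        · exact Or.inr ⟨x, Or.inr hx, hxx⟩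
      · rintro (hs | ⟨x, (rfl | hx), hxx⟩)
        · exact Or.inl (Or.inl hs)
        · exact Or.inl (Or.inr hxx)
        · exact Or.inr ⟨x, hx, hxx⟩
  rw [aux]
  simp [PySem.Set.empty]

theorem mem_bPrefixes (ms : List (List Char)) (cand : List Char) :
    PySem.Set.contains (bPrefixes ms) cand
      = (ms.contains cand || ms.any (fun m => PySem.Chars.startswith m (cand ++ ['.']))) := by
  rw [Bool.eq_iff_iff]
  rw [show PySem.Set.contains (bPrefixes ms) cand = List.contains (bPrefixes ms) cand from rfl]
  simp only [List.contains_eq_mem, List.any_eq_true, Bool.or_eq_true, decide_eq_true_eq,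
    PySem.Chars.startswith_iff]
  rw [mem_bPrefixes_mem]
  constructor
  · rintro ⟨m, hm, rfl | hp⟩
    · exact Or.inl hm
    · exact Or.inr ⟨m, hm, hp⟩
  · rintro (hm | ⟨m, hm, hp⟩)
    · exact ⟨cand, hm, Or.inl rfl⟩
    · exact ⟨m, hm, Or.inr hp⟩

theorem ic_glue (acc p : List Char) (xs : List (List Char)) :
    ic ((acc ++ '.' :: p) :: xs) = ic (acc :: p :: xs) := by
  cases xs with
  | nil => rfl
  | cons x xs =>
    show (acc ++ '.' :: p) ++ '.' :: ic (x :: xs) = acc ++ '.' :: (p ++ '.' :: ic (x :: xs))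
    simp

theorem bCands_eq (ps : List (List Char)) : ∀ acc,
    bCands acc ps = (List.range (ps.length + 1)).map (fun j => ic (acc :: ps.take j)) := by
  induction ps with
  | nil => intro acc; simp [bCands, ic]
  | cons p ps ih =>
    intro acc
    conv_rhs => rw [show (p :: ps).length + 1 = (ps.length + 1) + 1 from rfl,
      List.range_succ_eq_map, List.map_cons, List.map_map]
    rw [show bCands acc (p :: ps) = acc :: bCands (acc ++ '.' :: p) ps from rfl, ih]
    congr 1
    · apply List.map_congr_left
      intro j hj
      simp only [Function.comp_apply, Nat.succ_eq_add_one, List.take_succ_cons]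
      exact ic_glue acc p (ps.take j)

theorem cand_list_eq (p : List Char) (ps : List (List Char)) :
    (bCands p ps).reverse
      = (PySem.List.pyRange ((p :: ps).length : Int) 0 (-1)).map
          (fun i => PySem.Chars.join ['.'] (PySem.List.slice (p :: ps) none (some i))) := by
  rw [bCands_eq, PySem.List.pyRange_neg_one, List.map_map, ← List.map_reverse,
    List.range_eq_range', List.reverse_range']
  rw [List.map_map]
  apply List.map_congr_left
  intro k hk
  simp only [List.mem_range] at hk
  simp only [Function.comp_apply]
  have h0 : (0 : Nat) + (ps.length + 1) - 1 - k = ps.length - k := by omega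
  have h1 : ((p :: ps).length : Int) - 0 = (ps.length : Int) + 1 := by simp
  have h2 : (0 : ℤ) ≤ ((p :: ps).length : Int) - k := by simp; omega
  rw [PySem.List.slice_to _ h2, PySem.Chars.join, h0]
  have h3 : (((p :: ps).length : Int) - k).toNat = (ps.length - k) + 1 := by simp; omega
  rw [h3, List.take_succ_cons]
  rw [intercalate_eq_ic]

theorem bFind_eq_aLoop (parts ms : List (List Char)) (idx : List Int) :
    bFind (bPrefixes ms)
        (idx.map (fun i => PySem.Chars.join ['.'] (PySem.List.slice parts none (some i))))
      = aLoop parts ms idx := by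
  induction idx with
  | nil => rfl
  | cons i rest ih => simp only [List.map_cons, bFind, aLoop, mem_bPrefixes, ih]

-- ===== VERDICT (by name: the statement is the Claim_ definition above) =====
theorem internal_target_py_spec : Claim_equal_internal_target_py := by
  intro name modules _
  unfold Spec_internal_target_py internal_target_py internal_target_py_alt
  split_ifs
  · rfl
  · cases hp : PySem.Chars.splitOn name.toList ['.'] with
    | nil =>
      exfalso
      rw [splitOn_eq_sp] at hp
      exact sp_ne_nil _ hp
    | cons p ps =>
      simp only []
      rw [cand_list_eq, bFind_eq_aLoop]
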